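-- pv_equiv track=rewrite | github.com/VickeeX/LeetCodePy | collections_for_interview/SwordOffer.py | topic_13_count_robot_moving
-- ===== SOURCE A (Python) =====
-- def topic_13_count_robot_moving(threshold, rows, cols):
--     # backtracking
--     def sum_digit(num):
--         ans = 0
--         while num > 0:
--             ans += num % 10
--             num = num // 10
--         return ans
--
--     def limit(i, j):
--         return sum_digit(i) + sum_digit(j) <= threshold
--
--     def helper(i, j):
--         records[i * cols + j] = 1
--         for ni, nj in [(i - 1, j), (i, j - 1), (i + 1, j), (i, j + 1)]:
--             if 0 <= ni < rows and 0 <= nj < cols and records[ni * cols + nj] == 0 and limit(ni, nj):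
--                 helper(ni, nj)
--
--     if threshold < 0:
--         return 0
--     records = [0] * (rows * cols)  # 1: visited 2: limited 0: unvisited
--     helper(0, 0)
--     return records.count(1)
-- ===== SOURCE B (Python) =====
-- def topic_13_count_robot_moving(threshold, rows, cols):
--     # iterative fixpoint: repeatedly sweep the grid, marking unmarked cells that
--     # pass the digit-sum limit and touch an already-marked cell, until stable
--     def sum_digit(num):
--         s = 0
--         while num > 0:
--             s += num % 10
--             num = num // 10
--         return s
--
--     if threshold < 0 or rows <= 0 or cols <= 0:
--         return 0
--     marked = [0] * (rows * cols)
--     marked[0] = 1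
--     changed = True
--     while changed:
--         changed = False
--         for i in range(rows):
--             for j in range(cols):
--                 if marked[i * cols + j] == 0 and sum_digit(i) + sum_digit(j) <= threshold and any(
--                         0 <= ni < rows and 0 <= nj < cols and marked[ni * cols + nj] == 1
--                         for ni, nj in ((i - 1, j), (i, j - 1), (i + 1, j), (i, j + 1))):
--                     marked[i * cols + j] = 1
--                     changed = True
--     return marked.count(1)
-- ===== Notes on version B (the rewrite author's own statement) =====
-- stated objective: alternative
-- what changed: Replaces A's recursive DFS with explicit cell marking by an iterative fixpoint computation: repeated whole-grid sweeps that mark any limit-passing cell adjacent to an already-marked cell until a sweep changes nothing, trading deep recursion for a loop-based saturation.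
-- intended difference: For threshold >= 0 with rows < 0 and cols < 0 (rows*cols > 0), A allocates a non-empty grid, marks the start cell and returns 1 although the grid dimensions are negative; B returns 0, the intended answer for a grid with no valid cells. — e.g. on topic_13_count_robot_moving(0, -1, -1): A returns 1, B returns 0
import Mathlib
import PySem

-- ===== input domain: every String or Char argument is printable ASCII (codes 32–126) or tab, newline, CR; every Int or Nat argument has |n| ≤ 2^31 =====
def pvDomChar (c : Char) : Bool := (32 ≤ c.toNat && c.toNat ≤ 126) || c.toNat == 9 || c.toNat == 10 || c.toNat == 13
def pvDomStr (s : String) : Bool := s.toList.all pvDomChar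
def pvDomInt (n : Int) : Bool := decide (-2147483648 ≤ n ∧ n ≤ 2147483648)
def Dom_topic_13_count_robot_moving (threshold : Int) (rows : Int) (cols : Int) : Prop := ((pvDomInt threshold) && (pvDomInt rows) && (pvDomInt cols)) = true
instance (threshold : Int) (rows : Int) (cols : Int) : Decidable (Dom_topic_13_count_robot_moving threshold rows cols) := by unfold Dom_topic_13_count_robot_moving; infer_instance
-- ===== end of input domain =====

-- B replaces A's recursive DFS by an iterative whole-grid fixpoint saturation (objective: alternative).

-- ===== PORT A =====
-- while num > 0: ans += num % 10; num = num // 10   (fuel bounds the iteration count; num.toNat iterations always suffice since num // 10 < num)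
def sumDigitGoA : Nat → Int → Int → Int
  | 0, ans, _ => ans
  | fuel + 1, ans, num =>
      if 0 < num then sumDigitGoA fuel (ans + PySem.Int.mod num 10) (PySem.Int.floordiv num 10)
      else ans

def sumDigitA (num : Int) : Int := sumDigitGoA num.toNat 0 num

-- the four neighbours [(i-1,j),(i,j-1),(i+1,j),(i,j+1)]
def nbrsOf (i j : Int) : List (Int × Int) := [(i - 1, j), (i, j - 1), (i + 1, j), (i, j + 1)]

-- def helper(i, j): records[i*cols+j] = 1; for ni, nj in …: if 0<=ni<rows and 0<=nj<cols and records[ni*cols+nj]==0 and limit(ni,nj): helper(ni,nj)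
-- (fuel bounds the recursion depth; (rows*cols)+1 always suffices since every call marks a fresh cell)
def helperA (t r c : Int) : Nat → Int → Int → List Int → List Int
  | 0, _, _, m => m
  | fuel + 1, i, j, m =>
      (nbrsOf i j).foldl
        (fun acc p =>
          if 0 ≤ p.1 ∧ p.1 < r ∧ 0 ≤ p.2 ∧ p.2 < c ∧
             PySem.List.pyGet? acc (p.1 * c + p.2) = some 0 ∧
             sumDigitA p.1 + sumDigitA p.2 ≤ t
          then helperA t r c fuel p.1 p.2 acc else acc)
        (PySem.List.pySetD m (i * c + j) 1)

def topic_13_count_robot_moving (threshold : Int) (rows : Int) (cols : Int) : Int :=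
  if threshold < 0 then 0
  else
    PySem.List.count
      (helperA threshold rows cols ((rows * cols).toNat + 1) 0 0
        (PySem.List.pyRepeat [(0 : Int)] (rows * cols))) 1

-- ===== PORT B =====
def sumDigitGoB : Nat → Int → Int → Int
  | 0, s, _ => s
  | fuel + 1, s, num =>
      if 0 < num then sumDigitGoB fuel (s + PySem.Int.mod num 10) (PySem.Int.floordiv num 10)
      else s

def sumDigitB (num : Int) : Int := sumDigitGoB num.toNat 0 num

-- body of the double for-loop: mark cell (i,j) if unmarked, limit-passing and touching a marked cell
def sweepCell (t r c : Int) (st : List Int × Bool) (i j : Int) : List Int × Bool :=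
  if PySem.List.pyGet? st.1 (i * c + j) = some 0 ∧ sumDigitB i + sumDigitB j ≤ t ∧
     ((nbrsOf i j).any fun p =>
        decide (0 ≤ p.1 ∧ p.1 < r ∧ 0 ≤ p.2 ∧ p.2 < c ∧
                PySem.List.pyGet? st.1 (p.1 * c + p.2) = some 1)) = true
  then (PySem.List.pySetD st.1 (i * c + j) 1, true)
  else st

-- for i in range(rows): for j in range(cols): …
def sweepB (t r c : Int) (st : List Int × Bool) : List Int × Bool :=
  (PySem.List.pyRange 0 r 1).foldl
    (fun st i => (PySem.List.pyRange 0 c 1).foldl (fun st j => sweepCell t r c st i j) st) st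

-- while changed: changed = False; <sweep>   (fuel bounds the number of sweeps; rows*cols+1 always
-- suffices since every changing sweep marks at least one fresh cell)
def loopB (t r c : Int) : Nat → List Int → List Int
  | 0, m => m
  | fuel + 1, m =>
      match sweepB t r c (m, false) with
      | (m', ch) => if ch then loopB t r c fuel m' else m'

def topic_13_count_robot_moving_alt (threshold : Int) (rows : Int) (cols : Int) : Int :=
  if threshold < 0 ∨ rows ≤ 0 ∨ cols ≤ 0 then 0
  else
    PySem.List.count
      (loopB threshold rows cols ((rows * cols).toNat + 1)
        (PySem.List.pySetD (PySem.List.pyRepeat [(0 : Int)] (rows * cols)) 0 1)) 1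

-- ===== PRECONDITION & SPEC =====
-- Pre_ excludes exactly the inputs where A raises IndexError: threshold ≥ 0 with rows*cols ≤ 0,
-- where records = [0]*(rows*cols) is empty and helper(0,0) does records[0] = 1.
def Pre_topic_13_count_robot_moving (threshold : Int) (rows : Int) (cols : Int) : Prop :=
  threshold < 0 ∨ 0 < rows * cols
instance (threshold : Int) (rows : Int) (cols : Int) : Decidable (Pre_topic_13_count_robot_moving threshold rows cols) := by unfold Pre_topic_13_count_robot_moving; infer_instance

def pvWitness_topic_13_count_robot_moving : Int × Int × Int := (3, 2, 2)

-- For threshold ≥ 0 with rows < 0 and cols < 0 (so rows*cols > 0), A allocates a non-empty grid, marks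
-- the start cell and returns 1 although the dimensions are negative; B returns 0, the intended answer
-- for a grid with no valid cells.
def D_topic_13_count_robot_moving (threshold : Int) (rows : Int) (cols : Int) : Prop :=
  0 ≤ threshold ∧ rows < 0 ∧ cols < 0
instance (threshold : Int) (rows : Int) (cols : Int) : Decidable (D_topic_13_count_robot_moving threshold rows cols) := by unfold D_topic_13_count_robot_moving; infer_instance

def Spec_topic_13_count_robot_moving (threshold : Int) (rows : Int) (cols : Int) (out : Int) : Prop := ¬ D_topic_13_count_robot_moving threshold rows cols → out = topic_13_count_robot_moving_alt threshold rows cols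
instance (threshold : Int) (rows : Int) (cols : Int) (out : Int) : Decidable (Spec_topic_13_count_robot_moving threshold rows cols out) := by unfold Spec_topic_13_count_robot_moving; infer_instance

def pvDiffWitness_topic_13_count_robot_moving : Int × Int × Int := (0, -1, -1)
def pvDiffWitnessOut_topic_13_count_robot_moving : Int × Int := (1, 0)

-- ===== CLAIM (what is proved, stated in full; the proofs are below) =====
def Claim_unchanged_topic_13_count_robot_moving : Prop := ∀ (threshold : Int) (rows : Int) (cols : Int), Dom_topic_13_count_robot_moving threshold rows cols → Pre_topic_13_count_robot_moving threshold rows cols → Spec_topic_13_count_robot_moving threshold rows cols (topic_13_count_robot_moving threshold rows cols)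
def Claim_changed_topic_13_count_robot_moving : Prop := Dom_topic_13_count_robot_moving (pvDiffWitness_topic_13_count_robot_moving.1) (pvDiffWitness_topic_13_count_robot_moving.2.1) (pvDiffWitness_topic_13_count_robot_moving.2.2) ∧ Pre_topic_13_count_robot_moving (pvDiffWitness_topic_13_count_robot_moving.1) (pvDiffWitness_topic_13_count_robot_moving.2.1) (pvDiffWitness_topic_13_count_robot_moving.2.2) ∧ D_topic_13_count_robot_moving (pvDiffWitness_topic_13_count_robot_moving.1) (pvDiffWitness_topic_13_count_robot_moving.2.1) (pvDiffWitness_topic_13_count_robot_moving.2.2) ∧ topic_13_count_robot_moving (pvDiffWitness_topic_13_count_robot_moving.1) (pvDiffWitness_topic_13_count_robot_moving.2.1) (pvDiffWitness_topic_13_count_robot_moving.2.2) = pvDiffWitnessOut_topic_13_count_robot_moving.1 ∧ topic_13_count_robot_moving_alt (pvDiffWitness_topic_13_count_robot_moving.1) (pvDiffWitness_topic_13_count_robot_moving.2.1) (pvDiffWitness_topic_13_count_robot_moving.2.2) = pvDiffWitnessOut_topic_13_count_robot_moving.2 ∧ pvDiffWitnessOut_topic_13_count_robot_moving.1 ≠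 pvDiffWitnessOut_topic_13_count_robot_moving.2
def Claim_exact_topic_13_count_robot_moving : Prop := ∀ (threshold : Int) (rows : Int) (cols : Int), Dom_topic_13_count_robot_moving threshold rows cols → Pre_topic_13_count_robot_moving threshold rows cols → D_topic_13_count_robot_moving threshold rows cols → topic_13_count_robot_moving threshold rows cols ≠ topic_13_count_robot_moving_alt threshold rows cols

-- ===== LEMMAS AND PROOFS =====

-- ---- grid geometry ----

def inG (r c : Int) (p : Int × Int) : Prop := 0 ≤ p.1 ∧ p.1 < r ∧ 0 ≤ p.2 ∧ p.2 < c

-- value of the records list at grid position p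
def mget (c : Int) (m : List Int) (p : Int × Int) : Int := m.getD (p.1 * c + p.2).toNat 0

def okP (t r c : Int) (p : Int × Int) : Prop := inG r c p ∧ sumDigitA p.1 + sumDigitA p.2 ≤ t

-- records-list invariant: length rows*cols, every entry 0 or 1
def GInv (r c : Int) (m : List Int) : Prop :=
  m.length = (r * c).toNat ∧ ∀ x ∈ m, x = 0 ∨ x = 1

lemma idx_bounds {r c : Int} (hr : 0 < r) (hc : 0 < c) {p : Int × Int} (hp : inG r c p) :
    0 ≤ p.1 * c + p.2 ∧ p.1 * c + p.2 < r * c := by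
  obtain ⟨h1, h2, h3, h4⟩ := hp
  constructor
  · have := mul_nonneg h1 (le_of_lt hc); omega
  · have h5 : p.1 * c ≤ (r - 1) * c := mul_le_mul_of_nonneg_right (by omega) (le_of_lt hc)
    nlinarith

lemma idx_inj {r c : Int} (hc : 0 < c) {p q : Int × Int}
    (hp : inG r c p) (hq : inG r c q) (h : p.1 * c + p.2 = q.1 * c + q.2) : p = q := by
  obtain ⟨_, _, hp3, hp4⟩ := hp
  obtain ⟨_, _, hq3, hq4⟩ := hq
  have e1 : (p.2 + p.1 * c) / c = p.2 / c + p.1 := Int.add_mul_ediv_right _ _ (by omega)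
  have e2 : (q.2 + q.1 * c) / c = q.2 / c + q.1 := Int.add_mul_ediv_right _ _ (by omega)
  have z1 : p.2 / c = 0 := Int.ediv_eq_zero_of_lt hp3 hp4
  have z2 : q.2 / c = 0 := Int.ediv_eq_zero_of_lt hq3 hq4
  have h' : p.2 + p.1 * c = q.2 + q.1 * c := by omega
  have hfst : p.1 = q.1 := by rw [h'] at e1; omega
  have hsnd : p.2 = q.2 := by nlinarith
  exact Prod.ext hfst hsnd

def pOf (c : Int) (k : Nat) : Int × Int := ((k : Int) / c, (k : Int) % c)

lemma pOf_spec {r c : Int} (hr : 0 < r) (hc : 0 < c) (k : Nat) (hk : (k : Int) < r * c) :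
    inG r c (pOf c k) ∧ (pOf c k).1 * c + (pOf c k).2 = (k : Int) := by
  have hk0 : (0 : Int) ≤ (k : Int) := Int.natCast_nonneg k
  have h1 : 0 ≤ (k : Int) / c := Int.ediv_nonneg hk0 (le_of_lt hc)
  have h2 : (k : Int) / c < r := (Int.ediv_lt_iff_lt_mul hc).mpr (by nlinarith)
  have h3 : 0 ≤ (k : Int) % c := Int.emod_nonneg _ (by omega)
  have h4 : (k : Int) % c < c := Int.emod_lt_of_pos _ hc
  have h5 : c * ((k : Int) / c) + (k : Int) % c = (k : Int) := Int.ediv_add_emod _ _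
  exact ⟨⟨h1, h2, h3, h4⟩, by rw [pOf]; simp only; nlinarith⟩

lemma nbrs_symm {p q : Int × Int} (h : q ∈ nbrsOf p.1 p.2) : p ∈ nbrsOf q.1 q.2 := by
  simp only [nbrsOf, List.mem_cons, List.not_mem_nil, or_false] at h ⊢
  rcases h with h | h | h | h <;> subst h <;> simp only [Prod.ext_iff] <;> simp <;> omega

-- ---- list/mget utilities ----

lemma mget_mz (c : Int) (n : Nat) (p : Int × Int) : mget c (List.replicate n (0 : Int)) p = 0 := by
  simp [mget, List.getD_eq_getElem?_getD, List.getElem?_replicate]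
  split <;> rfl

lemma GInv_mz {r c : Int} : GInv r c (List.replicate (r * c).toNat (0 : Int)) := by
  refine ⟨List.length_replicate, ?_⟩
  intro x hx
  left; exact (List.eq_of_mem_replicate hx)

lemma getD_in_range {m : List Int} {k : Nat} (hk : k < m.length) (d : Int) :
    m.getD k d = m[k] := by
  simp [List.getD_eq_getElem?_getD, List.getElem?_eq_getElem hk]

lemma idx_toNat_lt {r c : Int} (hr : 0 < r) (hc : 0 < c) {m : List Int}
    (hlen : m.length = (r * c).toNat) {p : Int × Int} (hp : inG r c p) :
    (p.1 * c + p.2).toNat < m.length := by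
  obtain ⟨h0, h1⟩ := idx_bounds hr hc hp
  omega

lemma mget_pOf {r c : Int} (hr : 0 < r) (hc : 0 < c) {m : List Int}
    (hlen : m.length = (r * c).toNat) {k : Nat} (hk : k < m.length) (d : Int) :
    m.getD k d = mget c m (pOf c k) := by
  have hrc : 0 < r * c := mul_pos hr hc
  have hk' : (k : Int) < r * c := by omega
  obtain ⟨hin, hidx⟩ := pOf_spec hr hc k hk'
  have he : ((pOf c k).1 * c + (pOf c k).2).toNat = k := by omega
  rw [mget, he, getD_in_range hk, getD_in_range hk]

lemma pOf_inG {r c : Int} (hr : 0 < r) (hc : 0 < c) {m : List Int}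
    (hlen : m.length = (r * c).toNat) {k : Nat} (hk : k < m.length) : inG r c (pOf c k) := by
  have hrc : 0 < r * c := mul_pos hr hc
  exact (pOf_spec hr hc k (by omega)).1

lemma mget_cases {r c : Int} {m : List Int} (hm : GInv r c m) {p : Int × Int}
    (hr : 0 < r) (hc : 0 < c) (hp : inG r c p) : mget c m p = 0 ∨ mget c m p = 1 := by
  have hk := idx_toNat_lt hr hc hm.1 hp
  rw [mget, getD_in_range hk]
  exact hm.2 _ (List.getElem_mem hk)

lemma pyGet?_mget {r c : Int} {m : List Int} (hlen : m.length = (r * c).toNat) {p : Int × Int}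
    (hr : 0 < r) (hc : 0 < c) (hp : inG r c p) :
    PySem.List.pyGet? m (p.1 * c + p.2) = some (mget c m p) := by
  have hk := idx_toNat_lt hr hc hlen hp
  rw [PySem.List.pyGet?_of_nonneg _ (idx_bounds hr hc hp).1,
    List.getElem?_eq_getElem hk, mget, getD_in_range hk]

lemma mget_mark {r c : Int} {m : List Int} (hm : GInv r c m) (hr : 0 < r) (hc : 0 < c)
    {u : Int × Int} (hu : inG r c u) {p : Int × Int} (hp : inG r c p) :
    mget c (PySem.List.pySetD m (u.1 * c + u.2) 1) p = if p = u then 1 else mget c m p := by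
  rw [PySem.List.pySetD_of_nonneg _ _ (idx_bounds hr hc hu).1]
  have hku := idx_toNat_lt hr hc hm.1 hu
  have hkp := idx_toNat_lt hr hc hm.1 hp
  rw [mget, mget, List.getD_eq_getElem?_getD, List.getElem?_set, List.getD_eq_getElem?_getD]
  by_cases h : p = u
  · subst h; simp [hkp]
  · have hne : (u.1 * c + u.2).toNat ≠ (p.1 * c + p.2).toNat := by
      intro habs
      refine h (idx_inj hc hp hu ?_)
      have h1 := (idx_bounds hr hc hu).1
      have h2 := (idx_bounds hr hc hp).1
      omega
    simp [h, hne]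

lemma GInv_mark {r c : Int} {m : List Int} (hm : GInv r c m) (hr : 0 < r) (hc : 0 < c)
    {u : Int × Int} (hu : inG r c u) : GInv r c (PySem.List.pySetD m (u.1 * c + u.2) 1) := by
  rw [PySem.List.pySetD_of_nonneg _ _ (idx_bounds hr hc hu).1]
  refine ⟨by rw [List.length_set]; exact hm.1, ?_⟩
  intro x hx
  rcases List.mem_or_eq_of_mem_set hx with hx' | hx'
  · exact hm.2 _ hx'
  · right; exact hx'

-- zero-count bookkeeping (indices with default 1 so out-of-range is vacuous)
lemma countZero_le (m m' : List Int) (hlen : m.length = m'.length)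
    (h : ∀ k, m'.getD k 1 = 0 → m.getD k 1 = 0) : m'.count 0 ≤ m.count 0 := by
  induction m generalizing m' with
  | nil =>
    cases m' with
    | nil => simp
    | cons b l' => simp at hlen
  | cons a l ih =>
    cases m' with
    | nil => simp at hlen
    | cons b l' =>
      have h0 := h 0
      have ht : ∀ k, l'.getD k 1 = 0 → l.getD k 1 = 0 := fun k => h (k + 1)
      have hle := ih l' (by simpa using hlen) ht
      simp only [List.getD_cons_zero] at h0
      simp only [List.count_cons, beq_iff_eq]
      split_ifs <;> omega

lemma countZero_lt (m m' : List Int) (hlen : m.length = m'.length)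
    (h : ∀ k, m'.getD k 1 = 0 → m.getD k 1 = 0)
    (k : Nat) (hk1 : m.getD k 1 = 0) (hk2 : m'.getD k 1 ≠ 0) : m'.count 0 < m.count 0 := by
  induction m generalizing m' k with
  | nil =>
    exfalso
    cases m' with
    | nil => exact hk2 (hk1 ▸ rfl)
    | cons b l' => simp at hlen
  | cons a l ih =>
    cases m' with
    | nil => simp at hlen
    | cons b l' =>
      have h0 := h 0
      have ht : ∀ j, l'.getD j 1 = 0 → l.getD j 1 = 0 := fun j => h (j + 1)
      have hle := countZero_le l l' (by simpa using hlen) ht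
      simp only [List.getD_cons_zero] at h0
      simp only [List.count_cons, beq_iff_eq]
      cases k with
      | zero =>
        simp only [List.getD_cons_zero] at hk1 hk2
        split_ifs <;> omega
      | succ j =>
        simp only [List.getD_cons_succ] at hk1 hk2
        have hlt := ih l' (by simpa using hlen) ht j hk1 hk2
        split_ifs <;> omega

lemma grow_getD {r c : Int} (hr : 0 < r) (hc : 0 < c) {m m' : List Int}
    (hm : GInv r c m) (hm' : GInv r c m')
    (h : ∀ p, inG r c p → mget c m p = 1 → mget c m' p = 1) :
    ∀ k, m'.getD k 1 = 0 → m.getD k 1 = 0 := by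
  intro k hk
  by_cases hkl : k < m'.length
  · have hkl' : k < m.length := by rw [hm.1, ← hm'.1]; exact hkl
    rw [mget_pOf hr hc hm'.1 hkl] at hk
    rw [mget_pOf hr hc hm.1 hkl']
    have hin := pOf_inG hr hc hm'.1 hkl
    rcases mget_cases hm hr hc hin with h0 | h1
    · exact h0
    · exact absurd (hk ▸ h _ hin h1) (by omega)
  · rw [List.getD_eq_default _ _ (by omega)] at hk
    omega

lemma count0_le_of_grow {r c : Int} (hr : 0 < r) (hc : 0 < c) {m m' : List Int}
    (hm : GInv r c m) (hm' : GInv r c m')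
    (h : ∀ p, inG r c p → mget c m p = 1 → mget c m' p = 1) : m'.count 0 ≤ m.count 0 :=
  countZero_le m m' (hm.1.trans hm'.1.symm) (grow_getD hr hc hm hm' h)

lemma count0_lt_of_grow {r c : Int} (hr : 0 < r) (hc : 0 < c) {m m' : List Int}
    (hm : GInv r c m) (hm' : GInv r c m')
    (h : ∀ p, inG r c p → mget c m p = 1 → mget c m' p = 1)
    {u : Int × Int} (hu : inG r c u) (h0 : mget c m u = 0) (h1 : mget c m' u = 1) :
    m'.count 0 < m.count 0 := by
  refine countZero_lt m m' (hm.1.trans hm'.1.symm) (grow_getD hr hc hm hm' h)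
    (u.1 * c + u.2).toNat ?_ ?_
  · have hk := idx_toNat_lt hr hc hm.1 hu
    rw [getD_in_range hk]
    rw [mget, getD_in_range hk] at h0
    exact h0
  · have hk := idx_toNat_lt hr hc hm'.1 hu
    rw [getD_in_range hk]
    rw [mget, getD_in_range hk] at h1
    omega

lemma lists_eq {r c : Int} (hr : 0 < r) (hc : 0 < c) {m m' : List Int}
    (hm : GInv r c m) (hm' : GInv r c m')
    (h : ∀ p, inG r c p → (mget c m p = 1 ↔ mget c m' p = 1)) : m = m' := by
  have hlen : m.length = m'.length := hm.1.trans hm'.1.symm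
  apply List.ext_getElem hlen
  intro i h1 h2
  have e1 : m[i] = mget c m (pOf c i) := by rw [← getD_in_range h1 1, mget_pOf hr hc hm.1 h1]
  have e2 : m'[i] = mget c m' (pOf c i) := by rw [← getD_in_range h2 1, mget_pOf hr hc hm'.1 h2]
  have hin := pOf_inG hr hc hm.1 h1
  rw [e1, e2]
  have hiff := h _ hin
  rcases mget_cases hm hr hc hin with ha | ha <;> rcases mget_cases hm' hr hc hin with hb | hb <;>
    omega

-- ---- reachability relative to the unmarked cells of m ----

inductive RA (t r c : Int) (m : List Int) (u : Int × Int) : Int × Int → Prop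
  | refl : RA t r c m u u
  | tail {v w : Int × Int} : RA t r c m u v → w ∈ nbrsOf v.1 v.2 → okP t r c w →
      mget c m w = 0 → RA t r c m u w

lemma RA_trans {t r c : Int} {m : List Int} {u v w : Int × Int}
    (h1 : RA t r c m u v) (h2 : RA t r c m v w) : RA t r c m u w := by
  induction h2 with
  | refl => exact h1
  | tail _ hmem hok hun ih => exact RA.tail ih hmem hok hun

lemma RA_anti {t r c : Int} {m m' : List Int}
    (h : ∀ w, okP t r c w → mget c m' w = 0 → mget c m w = 0)
    {v p : Int × Int} (hp : RA t r c m' v p) : RA t r c m v p := by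
  induction hp with
  | refl => exact RA.refl
  | tail _ hmem hok hun ih => exact RA.tail ih hmem hok (h _ hok hun)


-- absorption: reachability in m from a fresh root v survives marking a saturated set U
lemma RA_absorb {t r c : Int} (hr : 0 < r) (hc : 0 < c) {m0 mcur : List Int}
    (hm0 : GInv r c m0) (hmc : GInv r c mcur) {U : Int × Int → Prop}
    (Hm : ∀ p, inG r c p → (mget c mcur p = 1 ↔ (mget c m0 p = 1 ∨ U p)))
    (Hsat : ∀ x, U x → ∀ w, RA t r c m0 x w → U w)
    {v : Int × Int} (hv0 : mget c m0 v = 0) (hvU : ¬ U v) :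
    ∀ w, RA t r c m0 v w → U w ∨ RA t r c mcur v w := by
  intro w hw
  induction hw with
  | refl => exact Or.inr (RA.refl)
  | @tail x w hprev hmem hok hun ih =>
    by_cases hU : U w
    · exact Or.inl hU
    · have hwin : inG r c w := hok.1
      have hmc0 : mget c mcur w = 0 := by
        rcases mget_cases hmc hr hc hwin with h | h
        · exact h
        · rcases (Hm w hwin).1 h with h' | h'
          · omega
          · exact absurd h' hU
      rcases ih with hxU | hx
      · exact absurd (Hsat _ hxU _ (RA.tail (RA.refl) hmem hok hun)) hU
      · exact Or.inr (RA.tail hx hmem hok hmc0)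

-- splitting off the unconditional marking of the root
lemma RA_bridge {t r c : Int} (hr : 0 < r) (hc : 0 < c) {m : List Int}
    (hm : GInv r c m) {u : Int × Int} (hu : inG r c u) (hu0 : mget c m u = 0) (p : Int × Int) :
    RA t r c m u p ↔
      (p = u ∨ ∃ v ∈ nbrsOf u.1 u.2, okP t r c v ∧
        mget c (PySem.List.pySetD m (u.1 * c + u.2) 1) v = 0 ∧
        RA t r c (PySem.List.pySetD m (u.1 * c + u.2) 1) v p) := by
  have hG1 := GInv_mark hm hr hc hu
  have hmg1 : ∀ q, inG r c q →
      mget c (PySem.List.pySetD m (u.1 * c + u.2) 1) q = if q = u then 1 else mget c m q :=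
    fun q hq => mget_mark hm hr hc hu hq
  have anti : ∀ w, okP t r c w →
      mget c (PySem.List.pySetD m (u.1 * c + u.2) 1) w = 0 → mget c m w = 0 := by
    intro w hok h
    rw [hmg1 w hok.1] at h
    by_cases hwu : w = u
    · simp [hwu] at h
    · simpa [hwu] using h
  constructor
  · intro h
    induction h with
    | refl => exact Or.inl rfl
    | @tail x w hprev hmem hok hun ih =>
      by_cases hwu : w = u
      · exact Or.inl hwu
      · right
        have hw1 : mget c (PySem.List.pySetD m (u.1 * c + u.2) 1) w = 0 := by
          rw [hmg1 w hok.1, if_neg hwu]; exact hun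
        rcases ih with hxu | ⟨v', hv'mem, hv'ok, hv'un, hv'ra⟩
        · subst hxu
          exact ⟨w, hmem, hok, hw1, RA.refl⟩
        · exact ⟨v', hv'mem, hv'ok, hv'un, RA.tail hv'ra hmem hok hw1⟩
  · rintro (rfl | ⟨v, hvmem, hvok, hvun, hvra⟩)
    · exact RA.refl
    · exact RA_trans (RA.tail (RA.refl) hvmem hvok (anti v hvok hvun)) (RA_anti anti hvra)

-- ---- the DFS (port A) marks exactly what is reachable ----

lemma helperA_spec {t r c : Int} (ht : 0 ≤ t) (hr : 0 < r) (hc : 0 < c) :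
    ∀ (fuel : Nat) (m : List Int) (u : Int × Int),
      GInv r c m → inG r c u → mget c m u = 0 → m.count 0 ≤ fuel →
      GInv r c (helperA t r c fuel u.1 u.2 m) ∧
      (∀ p, inG r c p →
        (mget c (helperA t r c fuel u.1 u.2 m) p = 1 ↔ (mget c m p = 1 ∨ RA t r c m u p))) := by
  intro fuel
  induction fuel with
  | zero =>
    intro m u hm hu h0 hcnt
    exfalso
    have hk := idx_toNat_lt hr hc hm.1 hu
    rw [mget, getD_in_range hk] at h0
    have : (0 : Int) ∈ m := h0 ▸ List.getElem_mem hk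
    have := List.count_pos_iff.mpr this
    omega
  | succ fuel ih =>
    intro m u hm hu h0 hcnt
    have hG1 := GInv_mark hm hr hc hu
    have hmg1 : ∀ q, inG r c q →
        mget c (PySem.List.pySetD m (u.1 * c + u.2) 1) q = if q = u then 1 else mget c m q :=
      fun q hq => mget_mark hm hr hc hu hq
    have hgrow0 : ∀ q, inG r c q → mget c m q = 1 →
        mget c (PySem.List.pySetD m (u.1 * c + u.2) 1) q = 1 := by
      intro q hq h
      rw [hmg1 q hq]; split <;> [rfl; exact h]
    have hcnt1 : (PySem.List.pySetD m (u.1 * c + u.2) 1).count 0 ≤ fuel := by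
      have := count0_lt_of_grow hr hc hm hG1 hgrow0 hu h0 (by rw [hmg1 u hu]; simp)
      omega
    -- characterization of the neighbour fold, by induction on the list of cells
    have main : ∀ (L : List (Int × Int)) (mcur : List Int) (U : (Int × Int) → Prop),
        GInv r c mcur →
        (∀ p, inG r c p → (mget c mcur p = 1 ↔
          (mget c (PySem.List.pySetD m (u.1 * c + u.2) 1) p = 1 ∨ U p))) →
        (∀ x, U x → ∀ w, RA t r c (PySem.List.pySetD m (u.1 * c + u.2) 1) x w → U w) →
        mcur.count 0 ≤ fuel →
        GInv r c (L.foldl (fun acc p =>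
          if 0 ≤ p.1 ∧ p.1 < r ∧ 0 ≤ p.2 ∧ p.2 < c ∧
             PySem.List.pyGet? acc (p.1 * c + p.2) = some 0 ∧
             sumDigitA p.1 + sumDigitA p.2 ≤ t
          then helperA t r c fuel p.1 p.2 acc else acc) mcur) ∧
        (∀ p, inG r c p → (mget c (L.foldl (fun acc p =>
          if 0 ≤ p.1 ∧ p.1 < r ∧ 0 ≤ p.2 ∧ p.2 < c ∧
             PySem.List.pyGet? acc (p.1 * c + p.2) = some 0 ∧
             sumDigitA p.1 + sumDigitA p.2 ≤ t
          then helperA t r c fuel p.1 p.2 acc else acc) mcur) p = 1 ↔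
          (mget c (PySem.List.pySetD m (u.1 * c + u.2) 1) p = 1 ∨ U p ∨
            ∃ v ∈ L, okP t r c v ∧ mget c (PySem.List.pySetD m (u.1 * c + u.2) 1) v = 0 ∧
              RA t r c (PySem.List.pySetD m (u.1 * c + u.2) 1) v p))) := by
      intro L
      induction L with
      | nil =>
        intro mcur U hG hHm hsat hcnt'
        simp only [List.foldl_nil]
        refine ⟨hG, ?_⟩
        intro p hp
        rw [hHm p hp]
        simp
      | cons v L ihL =>
        intro mcur U hG hHm hsat hcnt'
        simp only [List.foldl_cons]
        by_cases hg : 0 ≤ v.1 ∧ v.1 < r ∧ 0 ≤ v.2 ∧ v.2 < c ∧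
            PySem.List.pyGet? mcur (v.1 * c + v.2) = some 0 ∧
            sumDigitA v.1 + sumDigitA v.2 ≤ t
        · rw [if_pos hg]
          obtain ⟨hg1, hg2, hg3, hg4, hg5, hg6⟩ := hg
          have hvin : inG r c v := ⟨hg1, hg2, hg3, hg4⟩
          have hvok : okP t r c v := ⟨hvin, hg6⟩
          have hv0cur : mget c mcur v = 0 := by
            rw [pyGet?_mget hG.1 hr hc hvin] at hg5
            exact Option.some.inj hg5
          have hv0m1 : mget c (PySem.List.pySetD m (u.1 * c + u.2) 1) v = 0 ∧ ¬ U v := by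
            have hne : mget c mcur v ≠ 1 := by omega
            have hnot := fun h => hne ((hHm v hvin).2 h)
            constructor
            · rcases mget_cases hG1 hr hc hvin with h | h
              · exact h
              · exact absurd (Or.inl h) hnot
            · exact fun h => hnot (Or.inr h)
          obtain ⟨hGr, hchar⟩ := ih mcur v hG hvin hv0cur hcnt'
          have hgrow1 : ∀ p, inG r c p → mget c mcur p = 1 →
              mget c (helperA t r c fuel v.1 v.2 mcur) p = 1 :=
            fun p hp h => (hchar p hp).2 (Or.inl h)
          have hcnt1' : (helperA t r c fuel v.1 v.2 mcur).count 0 ≤ fuel :=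
            le_trans (count0_le_of_grow hr hc hG hGr hgrow1) hcnt'
          have anti1 : ∀ w, okP t r c w → mget c mcur w = 0 →
              mget c (PySem.List.pySetD m (u.1 * c + u.2) 1) w = 0 := by
            intro w hok hw
            rcases mget_cases hG1 hr hc hok.1 with h | h
            · exact h
            · have := (hHm w hok.1).2 (Or.inl h)
              omega
          have absorb := RA_absorb hr hc hG1 hG hHm hsat hv0m1.1 hv0m1.2 (t := t)
          have hHm' : ∀ p, inG r c p → (mget c (helperA t r c fuel v.1 v.2 mcur) p = 1 ↔
              (mget c (PySem.List.pySetD m (u.1 * c + u.2) 1) p = 1 ∨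
                (U p ∨ RA t r c (PySem.List.pySetD m (u.1 * c + u.2) 1) v p))) := by
            intro p hp
            rw [hchar p hp]
            constructor
            · rintro (h | h)
              · rcases (hHm p hp).1 h with h' | h'
                · exact Or.inl h'
                · exact Or.inr (Or.inl h')
              · exact Or.inr (Or.inr (RA_anti anti1 h))
            · rintro (h | h | h)
              · exact Or.inl ((hHm p hp).2 (Or.inl h))
              · exact Or.inl ((hHm p hp).2 (Or.inr h))
              · rcases absorb p h with h' | h'
                · exact Or.inl ((hHm p hp).2 (Or.inr h'))
                · exact Or.inr h'
          have hsat' : ∀ x, (U x ∨ RA t r c (PySem.List.pySetD m (u.1 * c + u.2) 1) v x) →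
              ∀ w, RA t r c (PySem.List.pySetD m (u.1 * c + u.2) 1) x w →
                (U w ∨ RA t r c (PySem.List.pySetD m (u.1 * c + u.2) 1) v w) := by
            rintro x (hx | hx) w hw
            · exact Or.inl (hsat x hx w hw)
            · exact Or.inr (RA_trans hx hw)
          obtain ⟨f1, f2⟩ := ihL (helperA t r c fuel v.1 v.2 mcur) _ hGr hHm' hsat' hcnt1'
          refine ⟨f1, ?_⟩
          intro p hp
          rw [f2 p hp]
          constructor
          · rintro (h | (h | h) | ⟨v', hv', hprops⟩)
            · exact Or.inl h
            · exact Or.inr (Or.inl h)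
            · exact Or.inr (Or.inr ⟨v, List.mem_cons_self, hvok, hv0m1.1, h⟩)
            · exact Or.inr (Or.inr ⟨v', List.mem_cons_of_mem _ hv', hprops⟩)
          · rintro (h | h | ⟨v', hv', hprops⟩)
            · exact Or.inl h
            · exact Or.inr (Or.inl (Or.inl h))
            · rcases List.mem_cons.1 hv' with rfl | hv''
              · exact Or.inr (Or.inl (Or.inr hprops.2.2))
              · exact Or.inr (Or.inr ⟨v', hv'', hprops⟩)
        · rw [if_neg hg]
          obtain ⟨f1, f2⟩ := ihL mcur U hG hHm hsat hcnt'
          refine ⟨f1, ?_⟩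
          intro p hp
          rw [f2 p hp]
          have habs : okP t r c v → mget c (PySem.List.pySetD m (u.1 * c + u.2) 1) v = 0 →
              RA t r c (PySem.List.pySetD m (u.1 * c + u.2) 1) v p →
              (mget c (PySem.List.pySetD m (u.1 * c + u.2) 1) p = 1 ∨ U p) := by
            intro hvok hv0 hra
            have hv1 : mget c mcur v = 1 := by
              rcases mget_cases hG hr hc hvok.1 with h | h
              · exfalso
                exact hg ⟨hvok.1.1, hvok.1.2.1, hvok.1.2.2.1, hvok.1.2.2.2, by
                  rw [pyGet?_mget hG.1 hr hc hvok.1, h], hvok.2⟩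
              · exact h
            rcases (hHm v hvok.1).1 hv1 with h' | h'
            · omega
            · exact Or.inr (hsat v h' p hra)
          constructor
          · rintro (h | h | ⟨v', hv', hprops⟩)
            · exact Or.inl h
            · exact Or.inr (Or.inl h)
            · exact Or.inr (Or.inr ⟨v', List.mem_cons_of_mem _ hv', hprops⟩)
          · rintro (h | h | ⟨v', hv', hprops⟩)
            · exact Or.inl h
            · exact Or.inr (Or.inl h)
            · rcases List.mem_cons.1 hv' with rfl | hv''
              · rcases habs hprops.1 hprops.2.1 hprops.2.2 with h' | h'
                · exact Or.inl h'
                · exact Or.inr (Or.inl h')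
              · exact Or.inr (Or.inr ⟨v', hv'', hprops⟩)
    have hm1Hm : ∀ p, inG r c p → (mget c (PySem.List.pySetD m (u.1 * c + u.2) 1) p = 1 ↔
        (mget c (PySem.List.pySetD m (u.1 * c + u.2) 1) p = 1 ∨ False)) := by
      intro p hp; simp
    obtain ⟨f1, f2⟩ := main (nbrsOf u.1 u.2) (PySem.List.pySetD m (u.1 * c + u.2) 1)
      (fun _ => False) hG1 hm1Hm (fun x hx => hx.elim) hcnt1
    constructor
    · show GInv r c (helperA t r c (fuel + 1) u.1 u.2 m)
      rw [helperA]
      exact f1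
    · intro p hp
      show mget c (helperA t r c (fuel + 1) u.1 u.2 m) p = 1 ↔ _
      rw [helperA]
      rw [f2 p hp, hmg1 p hp, RA_bridge hr hc hm hu h0 p]
      by_cases hpu : p = u
      · simp [hpu]
      · simp only [if_neg hpu, false_or]
        constructor
        · rintro (h | h)
          · exact Or.inl h
          · exact Or.inr (Or.inr h)
        · rintro (h | h | h)
          · exact Or.inl h
          · exact absurd h hpu
          · exact Or.inr h

-- ---- the sweep fixpoint (port B) marks exactly what is reachable ----

-- the guard of sweepCell, as a proposition about the current records list
def guardP (t r c : Int) (m : List Int) (p : Int × Int) : Prop :=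
  mget c m p = 0 ∧ sumDigitA p.1 + sumDigitA p.2 ≤ t ∧
    ∃ q ∈ nbrsOf p.1 p.2, inG r c q ∧ mget c m q = 1

-- reachable set of the whole program: RA over the all-zero grid from (0,0)
def ReachP (t r c : Int) (p : Int × Int) : Prop :=
  RA t r c (List.replicate (r * c).toNat (0 : Int)) (0, 0) p

lemma sdGo_eq : ∀ (f : Nat) (a n : Int), sumDigitGoB f a n = sumDigitGoA f a n := by
  intro f
  induction f with
  | zero => intro a n; rfl
  | succ f ih =>
    intro a n
    rw [sumDigitGoA, sumDigitGoB]
    split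
    · exact ih _ _
    · rfl

lemma sdB_eq (num : Int) : sumDigitB num = sumDigitA num := by
  rw [sumDigitB, sumDigitA, sdGo_eq]

lemma sweepCell_cases {t r c : Int} (hr : 0 < r) (hc : 0 < c) (st : List Int × Bool)
    {p : Int × Int} (hG : GInv r c st.1) (hp : inG r c p) :
    (¬ guardP t r c st.1 p ∧ sweepCell t r c st p.1 p.2 = st) ∨
    (guardP t r c st.1 p ∧
      sweepCell t r c st p.1 p.2 = (PySem.List.pySetD st.1 (p.1 * c + p.2) 1, true)) := by
  have hiff : (PySem.List.pyGet? st.1 (p.1 * c + p.2) = some 0 ∧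
      sumDigitB p.1 + sumDigitB p.2 ≤ t ∧
      ((nbrsOf p.1 p.2).any fun q =>
        decide (0 ≤ q.1 ∧ q.1 < r ∧ 0 ≤ q.2 ∧ q.2 < c ∧
                PySem.List.pyGet? st.1 (q.1 * c + q.2) = some 1)) = true) ↔
      guardP t r c st.1 p := by
    simp only [List.any_eq_true, decide_eq_true_eq, sdB_eq, guardP]
    constructor
    · rintro ⟨h1, h2, q, hqmem, hq1, hq2, hq3, hq4, hq5⟩
      have hqin : inG r c q := ⟨hq1, hq2, hq3, hq4⟩
      rw [pyGet?_mget hG.1 hr hc hp] at h1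
      rw [pyGet?_mget hG.1 hr hc hqin] at hq5
      exact ⟨Option.some.inj h1, h2, q, hqmem, hqin, Option.some.inj hq5⟩
    · rintro ⟨h1, h2, q, hqmem, hqin, hq5⟩
      refine ⟨by rw [pyGet?_mget hG.1 hr hc hp, h1], h2,
        q, hqmem, hqin.1, hqin.2.1, hqin.2.2.1, hqin.2.2.2, by
          rw [pyGet?_mget hG.1 hr hc hqin, hq5]⟩
  unfold sweepCell
  split_ifs with h
  · exact Or.inr ⟨hiff.1 h, rfl⟩
  · exact Or.inl ⟨fun hgp => h (hiff.2 hgp), rfl⟩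

lemma foldB_main {t r c : Int} (ht : 0 ≤ t) (hr : 0 < r) (hc : 0 < c) :
    ∀ (L : List (Int × Int)) (st : List Int × Bool), (∀ p ∈ L, inG r c p) → GInv r c st.1 →
      GInv r c (L.foldl (fun st p => sweepCell t r c st p.1 p.2) st).1 ∧
      (∀ p, inG r c p → mget c st.1 p = 1 →
        mget c (L.foldl (fun st p => sweepCell t r c st p.1 p.2) st).1 p = 1) ∧
      (st.2 = true → (L.foldl (fun st p => sweepCell t r c st p.1 p.2) st).2 = true) ∧
      ((∀ p, inG r c p → mget c st.1 p = 1 → ReachP t r c p) →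
        ∀ p, inG r c p → mget c (L.foldl (fun st p => sweepCell t r c st p.1 p.2) st).1 p = 1 →
          ReachP t r c p) := by
  intro L
  induction L with
  | nil =>
    intro st _ hG
    simp only [List.foldl_nil]
    exact ⟨hG, fun p _ h => h, fun h => h, fun hR p hp h => hR p hp h⟩
  | cons v L ihL =>
    intro st hmem hG
    have hv : inG r c v := hmem v List.mem_cons_self
    have hmem' : ∀ p ∈ L, inG r c p := fun p hp => hmem p (List.mem_cons_of_mem _ hp)
    simp only [List.foldl_cons]
    rcases sweepCell_cases (t := t) hr hc st hG hv with ⟨_, heq⟩ | ⟨hgp, heq⟩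
    · rw [heq]
      exact ihL st hmem' hG
    · rw [heq]
      have hG' : GInv r c (PySem.List.pySetD st.1 (v.1 * c + v.2) 1) := GInv_mark hG hr hc hv
      have hmg : ∀ q, inG r c q →
          mget c (PySem.List.pySetD st.1 (v.1 * c + v.2) 1) q =
            if q = v then 1 else mget c st.1 q := fun q hq => mget_mark hG hr hc hv hq
      obtain ⟨f1, f2, f3, f4⟩ := ihL (PySem.List.pySetD st.1 (v.1 * c + v.2) 1, true) hmem' hG'
      refine ⟨f1, ?_, fun _ => f3 rfl, ?_⟩
      · intro p hp h
        refine f2 p hp ?_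
        rw [hmg p hp]
        split <;> [rfl; exact h]
      · intro hR
        refine f4 ?_
        intro q hq h
        rw [hmg q hq] at h
        by_cases hqv : q = v
        · subst hqv
          obtain ⟨hq0, hlim, q', hq'mem, hq'in, hq'1⟩ := hgp
          exact RA.tail (hR q' hq'in hq'1) (nbrs_symm hq'mem) ⟨hq, hlim⟩ (mget_mz c _ q)
        · rw [if_neg hqv] at h
          exact hR q hq h

lemma foldB_stuck {t r c : Int} (ht : 0 ≤ t) (hr : 0 < r) (hc : 0 < c) :
    ∀ (L : List (Int × Int)) (m : List Int), (∀ p ∈ L, inG r c p) → GInv r c m →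
      (L.foldl (fun st p => sweepCell t r c st p.1 p.2) (m, false)).2 = false →
      (L.foldl (fun st p => sweepCell t r c st p.1 p.2) (m, false)) = (m, false) ∧
      ∀ p ∈ L, ¬ guardP t r c m p := by
  intro L
  induction L with
  | nil =>
    intro m _ _ _
    simp
  | cons v L ihL =>
    intro m hmem hG hfalse
    have hv : inG r c v := hmem v List.mem_cons_self
    have hmem' : ∀ p ∈ L, inG r c p := fun p hp => hmem p (List.mem_cons_of_mem _ hp)
    simp only [List.foldl_cons] at hfalse ⊢
    rcases sweepCell_cases (t := t) hr hc (m, false) hG hv with ⟨hng, heq⟩ | ⟨hgp, heq⟩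
    · rw [heq] at hfalse ⊢
      obtain ⟨e1, e2⟩ := ihL m hmem' hG hfalse
      refine ⟨e1, ?_⟩
      intro p hp
      rcases List.mem_cons.1 hp with rfl | hp'
      · exact hng
      · exact e2 p hp'
    · exfalso
      rw [heq] at hfalse
      have := (foldB_main ht hr hc L (PySem.List.pySetD m (v.1 * c + v.2) 1, true) hmem'
        (GInv_mark hG hr hc hv)).2.2.1 rfl
      rw [hfalse] at this
      exact Bool.false_ne_true this

lemma foldB_progress {t r c : Int} (ht : 0 ≤ t) (hr : 0 < r) (hc : 0 < c) :
    ∀ (L : List (Int × Int)) (m : List Int), (∀ p ∈ L, inG r c p) → GInv r c m →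
      (L.foldl (fun st p => sweepCell t r c st p.1 p.2) (m, false)).2 = true →
      (L.foldl (fun st p => sweepCell t r c st p.1 p.2) (m, false)).1.count 0 < m.count 0 := by
  intro L
  induction L with
  | nil =>
    intro m _ _ htrue
    simp at htrue
  | cons v L ihL =>
    intro m hmem hG htrue
    have hv : inG r c v := hmem v List.mem_cons_self
    have hmem' : ∀ p ∈ L, inG r c p := fun p hp => hmem p (List.mem_cons_of_mem _ hp)
    simp only [List.foldl_cons] at htrue ⊢
    rcases sweepCell_cases (t := t) hr hc (m, false) hG hv with ⟨_, heq⟩ | ⟨hgp, heq⟩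
    · rw [heq] at htrue ⊢
      exact ihL m hmem' hG htrue
    · rw [heq]
      dsimp only at htrue ⊢
      have hG' : GInv r c (PySem.List.pySetD m (v.1 * c + v.2) 1) := GInv_mark hG hr hc hv
      have hmg : ∀ q, inG r c q →
          mget c (PySem.List.pySetD m (v.1 * c + v.2) 1) q =
            if q = v then 1 else mget c m q := fun q hq => mget_mark hG hr hc hv hq
      obtain ⟨f1, f2, _, _⟩ := foldB_main ht hr hc L (PySem.List.pySetD m (v.1 * c + v.2) 1, true)
        hmem' hG'
      have hlt : (PySem.List.pySetD m (v.1 * c + v.2) 1).count 0 < m.count 0 := by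
        refine count0_lt_of_grow hr hc hG hG' ?_ hv hgp.1 (by rw [hmg v hv]; simp)
        intro q hq h
        rw [hmg q hq]
        split <;> [rfl; exact h]
      have hle : (L.foldl (fun st p => sweepCell t r c st p.1 p.2)
          (PySem.List.pySetD m (v.1 * c + v.2) 1, true)).1.count 0 ≤
          (PySem.List.pySetD m (v.1 * c + v.2) 1).count 0 :=
        count0_le_of_grow hr hc hG' f1 (fun p hp h => f2 p hp h)
      omega

def cellsL (r c : Int) : List (Int × Int) :=
  (PySem.List.pyRange 0 r 1).flatMap (fun i => (PySem.List.pyRange 0 c 1).map (fun j => (i, j)))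

lemma sweepB_eq_cells (t r c : Int) (st : List Int × Bool) :
    sweepB t r c st = (cellsL r c).foldl (fun st p => sweepCell t r c st p.1 p.2) st := by
  rw [sweepB, cellsL, List.foldl_flatMap]
  apply PySem.List.foldl_congr_mem
  intro acc x _
  rw [List.foldl_map]

lemma mem_cellsL {r c : Int} {p : Int × Int} : p ∈ cellsL r c ↔ inG r c p := by
  simp only [cellsL, List.mem_flatMap, List.mem_map, PySem.List.mem_pyRange_one, inG]
  constructor
  · rintro ⟨i, hi, j, hj, rfl⟩
    exact ⟨hi.1, hi.2, hj.1, hj.2⟩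
  · rintro ⟨h1, h2, h3, h4⟩
    exact ⟨p.1, ⟨h1, h2⟩, p.2, ⟨h3, h4⟩, rfl⟩

lemma loopB_spec {t r c : Int} (ht : 0 ≤ t) (hr : 0 < r) (hc : 0 < c) :
    ∀ (fuel : Nat) (m : List Int), GInv r c m → m.count 0 < fuel →
      (∀ p, inG r c p → mget c m p = 1 → ReachP t r c p) →
      mget c m (0, 0) = 1 →
      GInv r c (loopB t r c fuel m) ∧
      (∀ p, inG r c p → (mget c (loopB t r c fuel m) p = 1 ↔ ReachP t r c p)) := by
  intro fuel
  induction fuel with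
  | zero => intro m _ hcnt _ _; omega
  | succ fuel ihf =>
    intro m hG hcnt hreach h00
    have hcells : ∀ p ∈ cellsL r c, inG r c p := fun p hp => mem_cellsL.1 hp
    rcases hS0 : sweepB t r c (m, false) with ⟨m', ch⟩
    have hSc := hS0
    rw [sweepB_eq_cells] at hSc
    have hres : loopB t r c (fuel + 1) m = if ch then loopB t r c fuel m' else m' := by
      rw [loopB, hS0]
    cases ch with
    | false =>
      have hf : ((cellsL r c).foldl (fun st p => sweepCell t r c st p.1 p.2) (m, false)).2
          = false := by rw [hSc]
      obtain ⟨heq, hng⟩ := foldB_stuck ht hr hc (cellsL r c) m hcells hG hf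
      have hm' : m' = m := congrArg Prod.fst ((hSc.symm.trans heq))
      have hres2 : loopB t r c (fuel + 1) m = m := by rw [hres, if_neg (by simp), hm']
      rw [hres2]
      refine ⟨hG, ?_⟩
      intro p hp
      constructor
      · exact hreach p hp
      · have closed : ∀ q, ReachP t r c q → inG r c q ∧ mget c m q = 1 := by
          intro q hq
          induction hq with
          | refl => exact ⟨⟨le_refl 0, hr, le_refl 0, hc⟩, h00⟩
          | @tail x w hprev hmem hok hun ihd =>
            refine ⟨hok.1, ?_⟩
            by_contra hne
            have hw0 : mget c m w = 0 := by
              rcases mget_cases hG hr hc hok.1 with h | h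
              · exact h
              · exact absurd h hne
            exact hng w (mem_cellsL.2 hok.1) ⟨hw0, hok.2, x, nbrs_symm hmem, ihd.1, ihd.2⟩
        exact fun hq => (closed p hq).2
    | true =>
      have htr : ((cellsL r c).foldl (fun st p => sweepCell t r c st p.1 p.2) (m, false)).2
          = true := by rw [hSc]
      obtain ⟨f1, f2, _, f4⟩ := foldB_main ht hr hc (cellsL r c) (m, false) hcells hG
      have hm' : ((cellsL r c).foldl (fun st p => sweepCell t r c st p.1 p.2) (m, false)).1
          = m' := by rw [hSc]
      have hprog := foldB_progress ht hr hc (cellsL r c) m hcells hG htr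
      rw [hm'] at f1 f2 hprog f4
      have hres3 : loopB t r c (fuel + 1) m = loopB t r c fuel m' := by
        rw [hres, if_pos rfl]
      rw [hres3]
      exact ihf m' f1 (by omega) (f4 hreach) (f2 (0, 0) ⟨le_refl 0, hr, le_refl 0, hc⟩ h00)

lemma main_eq {t r c : Int} (ht : 0 ≤ t) (hr : 0 < r) (hc : 0 < c) :
    topic_13_count_robot_moving t r c = topic_13_count_robot_moving_alt t r c := by
  have hrc : 0 < r * c := mul_pos hr hc
  have hin00 : inG r c ((0 : Int), (0 : Int)) := ⟨le_refl 0, hr, le_refl 0, hc⟩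
  have hcntA : (List.replicate (r * c).toNat (0 : Int)).count 0 ≤ (r * c).toNat + 1 := by
    have := List.count_le_length (a := (0 : Int)) (l := List.replicate (r * c).toNat 0)
    rw [List.length_replicate] at this
    omega
  obtain ⟨hGA, hcharA⟩ := helperA_spec ht hr hc ((r * c).toNat + 1)
    (List.replicate (r * c).toNat 0) ((0 : Int), (0 : Int)) GInv_mz hin00
    (mget_mz c _ _) hcntA
  -- B's initial list, with its index written in grid form
  have hidx : (((0 : Int), (0 : Int)).1 * c + ((0 : Int), (0 : Int)).2) = (0 : Int) := by simp
  have hB0 : PySem.List.pySetD (List.replicate (r * c).toNat (0 : Int)) (0 : Int) 1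
      = PySem.List.pySetD (List.replicate (r * c).toNat (0 : Int))
          (((0 : Int), (0 : Int)).1 * c + ((0 : Int), (0 : Int)).2) 1 := by rw [hidx]
  have hGm0 : GInv r c (PySem.List.pySetD (List.replicate (r * c).toNat (0 : Int))
      (((0 : Int), (0 : Int)).1 * c + ((0 : Int), (0 : Int)).2) 1) :=
    GInv_mark GInv_mz hr hc hin00
  have hmgm0 : ∀ q, inG r c q →
      mget c (PySem.List.pySetD (List.replicate (r * c).toNat (0 : Int))
        (((0 : Int), (0 : Int)).1 * c + ((0 : Int), (0 : Int)).2) 1) q =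
      if q = ((0 : Int), (0 : Int)) then 1 else mget c (List.replicate (r * c).toNat 0) q :=
    fun q hq => mget_mark GInv_mz hr hc hin00 hq
  have h00 : mget c (PySem.List.pySetD (List.replicate (r * c).toNat (0 : Int))
      (((0 : Int), (0 : Int)).1 * c + ((0 : Int), (0 : Int)).2) 1) ((0 : Int), (0 : Int)) = 1 := by
    rw [hmgm0 _ hin00]; simp
  have hsub : ∀ q, inG r c q →
      mget c (PySem.List.pySetD (List.replicate (r * c).toNat (0 : Int))
        (((0 : Int), (0 : Int)).1 * c + ((0 : Int), (0 : Int)).2) 1) q = 1 →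
      ReachP t r c q := by
    intro q hq h
    rw [hmgm0 q hq] at h
    by_cases hq0 : q = ((0 : Int), (0 : Int))
    · subst hq0; exact RA.refl
    · rw [if_neg hq0, mget_mz] at h
      omega
  have hcntB : (PySem.List.pySetD (List.replicate (r * c).toNat (0 : Int))
      (((0 : Int), (0 : Int)).1 * c + ((0 : Int), (0 : Int)).2) 1).count 0 <
      (r * c).toNat + 1 := by
    have h1 := List.count_le_length (a := (0 : Int))
      (l := PySem.List.pySetD (List.replicate (r * c).toNat (0 : Int))
        (((0 : Int), (0 : Int)).1 * c + ((0 : Int), (0 : Int)).2) 1)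
    rw [hGm0.1] at h1
    omega
  obtain ⟨hGB, hcharB⟩ := loopB_spec ht hr hc ((r * c).toNat + 1) _ hGm0 hcntB hsub h00
  have hiff : ∀ p, inG r c p →
      (mget c (helperA t r c ((r * c).toNat + 1) ((0 : Int), (0 : Int)).1
          ((0 : Int), (0 : Int)).2 (List.replicate (r * c).toNat 0)) p = 1 ↔
        mget c (loopB t r c ((r * c).toNat + 1)
          (PySem.List.pySetD (List.replicate (r * c).toNat (0 : Int))
            (((0 : Int), (0 : Int)).1 * c + ((0 : Int), (0 : Int)).2) 1)) p = 1) := by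
    intro p hp
    constructor
    · intro h
      rcases (hcharA p hp).1 h with h' | h'
      · rw [mget_mz] at h'; omega
      · exact (hcharB p hp).2 h'
    · intro h
      exact (hcharA p hp).2 (Or.inr ((hcharB p hp).1 h))
  have hlist := lists_eq hr hc hGA hGB hiff
  rw [topic_13_count_robot_moving, topic_13_count_robot_moving_alt,
    if_neg (by omega), if_neg (by omega), PySem.List.pyRepeat_singleton, hB0]
  exact congrArg (fun l => ((PySem.List.count l 1 : Nat) : Int)) hlist

-- ===== VERDICT (by name: the statement is the Claim_ definition above) =====
theorem topic_13_count_robot_moving_spec : Claim_unchanged_topic_13_count_robot_moving := by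
  intro t r c _hDom hPre hD
  by_cases hlt : t < 0
  · show topic_13_count_robot_moving t r c = topic_13_count_robot_moving_alt t r c
    rw [topic_13_count_robot_moving, topic_13_count_robot_moving_alt, if_pos hlt, if_pos (Or.inl hlt)]
  · have ht : 0 ≤ t := by omega
    have hrc : 0 < r * c := by
      rcases hPre with h | h
      · omega
      · exact h
    rcases pos_and_pos_or_neg_and_neg_of_mul_pos hrc with ⟨hr, hc⟩ | ⟨hr, hc⟩
    · exact main_eq ht hr hc
    · exact absurd ⟨ht, hr, hc⟩ hD

theorem topic_13_count_robot_moving_changed : Claim_changed_topic_13_count_robot_moving := by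
  unfold Claim_changed_topic_13_count_robot_moving; decide

theorem topic_13_count_robot_moving_tight : Claim_exact_topic_13_count_robot_moving := by
  intro t r c _hDom _hPre hD
  obtain ⟨ht, hrneg, hcneg⟩ := hD
  have hrc : 0 < r * c := mul_pos_of_neg_of_neg hrneg hcneg
  have hB : topic_13_count_robot_moving_alt t r c = 0 := by
    rw [topic_13_count_robot_moving_alt, if_pos (Or.inr (Or.inl (by omega)))]
  have hA : topic_13_count_robot_moving t r c = 1 := by
    rw [topic_13_count_robot_moving, if_neg (by omega), PySem.List.pyRepeat_singleton]
    obtain ⟨k, hk⟩ : ∃ k, (r * c).toNat = k + 1 := ⟨(r * c).toNat - 1, by omega⟩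
    rw [hk, helperA]
    simp only [nbrsOf, List.foldl_cons, List.foldl_nil]
    rw [if_neg (by rintro ⟨h1, h2, -⟩; omega), if_neg (by rintro ⟨h1, h2, -⟩; omega),
      if_neg (by rintro ⟨h1, h2, -⟩; omega), if_neg (by rintro ⟨h1, h2, -⟩; omega),
      PySem.List.pySetD_of_nonneg _ _ (by simp)]
    have h0 : ((0 : Int) * c + 0).toNat = 0 := by simp
    rw [h0, List.replicate_succ, List.set_cons_zero, PySem.List.count_eq]
    simp [List.count_replicate]
  rw [hA, hB]
  exact one_ne_zero
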